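-- pv_equiv track=rewrite | github.com/mexyusef/fmustools | fmuslang/schnell/creator/package_json.py | get_devdeps_kv
-- ===== SOURCE A (Python) =====
-- def get_devdeps(jsoncontent):
--   """
--   kembalikan json 'devDependencies'
--   """
--   if 'devDependencies' in jsoncontent:
--     return jsoncontent['devDependencies']
--
--   return None
--
-- def keys(json_part):
--   if json_part is None:
--     return []
--   return json_part.keys()
--
-- def get_devdeps_keys(jsoncontent):
--   json_part = get_devdeps(jsoncontent)
--   return keys(json_part)
--
-- def get_devdeps_kv(jsoncontent, versions=[]):
--   json_part = get_devdeps(jsoncontent)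
--   if json_part is None:
--     return None
--   key_list = get_devdeps_keys(jsoncontent)
--   if len(versions)==0:
--     return [f'{k}@{v}' for k,v in json_part.items()]
--   else:
--     '''
--     versions tdk normal itemsnya, normalkan dg ambil dari
--     '''
--     normalify = [k for k in key_list for l in versions if l.lower() in k.lower()]
--     noversions = [k for k in key_list if k not in normalify]
--     withversions = [k+'@'+v for (k,v) in json_part.items() if k in normalify]
--
--     return withversions+noversions
-- ===== SOURCE B (Python) =====
-- def get_devdeps_kv(jsoncontent, versions=[]):
--     deps = jsoncontent.get('devDependencies')
--     if deps is None:
--         return None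
--     if len(versions) == 0:
--         return [f'{k}@{v}' for k, v in deps.items()]
--     withversions = []
--     noversions = []
--     for k, v in deps.items():
--         if any(l.lower() in k.lower() for l in versions):
--             withversions.append(k + '@' + v)
--         else:
--             noversions.append(k)
--     return withversions + noversions
-- ===== Notes on version B (the rewrite author's own statement) =====
-- stated objective: simpler
-- what changed: Replaces the normalify index list (a nested comprehension) plus two membership-filtered scans with a single partitioning pass over items() that appends each dependency to withversions or noversions directly.
import Mathlib
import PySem

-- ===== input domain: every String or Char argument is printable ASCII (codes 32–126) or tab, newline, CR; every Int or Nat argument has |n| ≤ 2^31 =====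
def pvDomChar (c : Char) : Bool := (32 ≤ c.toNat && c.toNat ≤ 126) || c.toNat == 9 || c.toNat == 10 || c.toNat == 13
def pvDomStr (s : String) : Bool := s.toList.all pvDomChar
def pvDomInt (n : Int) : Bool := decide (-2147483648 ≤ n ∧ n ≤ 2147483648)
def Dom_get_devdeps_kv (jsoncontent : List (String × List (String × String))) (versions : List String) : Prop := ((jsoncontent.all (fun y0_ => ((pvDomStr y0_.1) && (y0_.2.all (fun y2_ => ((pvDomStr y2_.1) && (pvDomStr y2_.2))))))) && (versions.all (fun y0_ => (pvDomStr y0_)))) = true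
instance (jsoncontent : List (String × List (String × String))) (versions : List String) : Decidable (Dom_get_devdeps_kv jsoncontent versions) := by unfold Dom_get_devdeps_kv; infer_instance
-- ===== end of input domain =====

-- B changes only the decomposition (one partitioning pass instead of an index list plus two
-- membership-filtered scans); return value identical, no speed claim.

-- ===== PORT A =====
-- get_devdeps: "if 'devDependencies' in jsoncontent: return jsoncontent['devDependencies']; return None"
-- (dict lookup on the association list = first match)
def pvGetDevdepsA (jsoncontent : List (String × List (String × String))) : Option (List (String × String)) :=
  match jsoncontent with
  | [] => none
  | (k, v) :: rest => if k = "devDependencies" then some v else pvGetDevdepsA rest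

-- keys(json_part): [] for None, else json_part.keys()
def pvKeysA (json_part : Option (List (String × String))) : List String :=
  match json_part with
  | none => []
  | some d => d.map (·.1)

def pvGetDevdepsKeysA (jsoncontent : List (String × List (String × String))) : List String :=
  pvKeysA (pvGetDevdepsA jsoncontent)

def get_devdeps_kv (jsoncontent : List (String × List (String × String))) (versions : List String) : Option (List String) :=
  match pvGetDevdepsA jsoncontent with
  | none => none
  | some json_part =>
    let key_list := pvGetDevdepsKeysA jsoncontent
    if versions.length = 0 then
      some (json_part.map (fun kv => kv.1 ++ "@" ++ kv.2))          -- f'{k}@{v}'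
    else
      -- normalify = [k for k in key_list for l in versions if l.lower() in k.lower()]
      let normalify := key_list.flatMap (fun k =>
        (versions.filter (fun l => PySem.Str.isIn (PySem.Str.lower l) (PySem.Str.lower k))).map (fun _ => k))
      -- noversions = [k for k in key_list if k not in normalify]
      let noversions := key_list.filter (fun k => !(normalify.contains k))
      -- withversions = [k+'@'+v for (k,v) in json_part.items() if k in normalify]
      let withversions := (json_part.filter (fun kv => normalify.contains kv.1)).map
        (fun kv => kv.1 ++ "@" ++ kv.2)
      some (withversions ++ noversions)

-- ===== PORT B =====
-- jsoncontent.get('devDependencies')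
def pvDictGetB (jsoncontent : List (String × List (String × String))) : Option (List (String × String)) :=
  match jsoncontent with
  | [] => none
  | (k, v) :: rest => if k = "devDependencies" then some v else pvDictGetB rest

def get_devdeps_kv_alt (jsoncontent : List (String × List (String × String))) (versions : List String) : Option (List String) :=
  match pvDictGetB jsoncontent with
  | none => none
  | some deps =>
    if versions.length = 0 then
      some (deps.map (fun kv => kv.1 ++ "@" ++ kv.2))
    else
      -- single pass: for k, v in deps.items(): append to withversions or noversions
      let p := deps.foldl (fun (acc : List String × List String) kv =>
        if versions.any (fun l => PySem.Str.isIn (PySem.Str.lower l) (PySem.Str.lower kv.1)) then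
          (acc.1 ++ [kv.1 ++ "@" ++ kv.2], acc.2)
        else
          (acc.1, acc.2 ++ [kv.1])) ([], [])
      some (p.1 ++ p.2)

-- ===== PRECONDITION & SPEC =====
def Spec_get_devdeps_kv (jsoncontent : List (String × List (String × String))) (versions : List String) (out : Option (List String)) : Prop := out = get_devdeps_kv_alt jsoncontent versions
instance (jsoncontent : List (String × List (String × String))) (versions : List String) (out : Option (List String)) : Decidable (Spec_get_devdeps_kv jsoncontent versions out) := by unfold Spec_get_devdeps_kv; infer_instance

-- ===== CLAIM (what is proved, stated in full; the proofs are below) =====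
def Claim_equal_get_devdeps_kv : Prop := ∀ (jsoncontent : List (String × List (String × String))) (versions : List String), Dom_get_devdeps_kv jsoncontent versions → Spec_get_devdeps_kv jsoncontent versions (get_devdeps_kv jsoncontent versions)

-- ===== LEMMAS AND PROOFS =====

-- the two lookup helpers are the same recursion
theorem pvDictGetB_eq_A (j : List (String × List (String × String))) :
    pvDictGetB j = pvGetDevdepsA j := by
  induction j with
  | nil => rfl
  | cons kv rest ih => simp [pvDictGetB, pvGetDevdepsA, ih]

-- membership in normalify, for a key of the list, is exactly the any-version predicate
theorem contains_normalify (key_list versions : List String) (k : String) (hk : k ∈ key_list) :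
    (key_list.flatMap (fun k' =>
      (versions.filter (fun l => PySem.Str.isIn (PySem.Str.lower l) (PySem.Str.lower k'))).map
        (fun _ => k'))).contains k
    = versions.any (fun l => PySem.Str.isIn (PySem.Str.lower l) (PySem.Str.lower k)) := by
  rw [Bool.eq_iff_iff]
  simp only [List.contains_iff_mem, List.mem_flatMap, List.mem_map, List.mem_filter,
    List.any_eq_true]
  constructor
  · rintro ⟨k', _, l, ⟨hl, hq⟩, rfl⟩
    exact ⟨l, hl, hq⟩
  · rintro ⟨l, hl, hq⟩
    exact ⟨k, hk, l, ⟨hl, hq⟩, rfl⟩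

-- B's partitioning fold, characterised by two filters
theorem foldl_partition (p : String × String → Bool) (deps : List (String × String))
    (a b : List String) :
    deps.foldl (fun (acc : List String × List String) kv =>
      if p kv then (acc.1 ++ [kv.1 ++ "@" ++ kv.2], acc.2) else (acc.1, acc.2 ++ [kv.1])) (a, b)
    = (a ++ (deps.filter p).map (fun kv => kv.1 ++ "@" ++ kv.2),
       b ++ (deps.filter (fun kv => !p kv)).map (·.1)) := by
  induction deps generalizing a b with
  | nil => simp
  | cons kv rest ih =>
    by_cases h : p kv = true <;> simp [List.foldl_cons, h, ih]

-- ===== VERDICT (by name: the statement is the Claim_ definition above) =====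
theorem get_devdeps_kv_spec : Claim_equal_get_devdeps_kv := by
  intro j versions _
  unfold Spec_get_devdeps_kv get_devdeps_kv get_devdeps_kv_alt
  rw [pvDictGetB_eq_A]
  cases hj : pvGetDevdepsA j with
  | none => rfl
  | some deps =>
    by_cases hv : versions.length = 0
    · simp [hv]
    · simp only [hv, if_false]
      rw [foldl_partition]
      simp only [List.nil_append]
      congr 1
      have hkeys : pvGetDevdepsKeysA j = deps.map (·.1) := by
        simp [pvGetDevdepsKeysA, hj, pvKeysA]
      congr 1
      · -- withversions
        apply congrArg
        apply List.filter_congr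
        intro kv hkv
        exact contains_normalify _ versions kv.1 (by rw [hkeys]; exact List.mem_map_of_mem hkv)
      · -- noversions
        have hA : (pvGetDevdepsKeysA j).filter (fun k =>
            !(((pvGetDevdepsKeysA j).flatMap (fun k' =>
              (versions.filter (fun l => PySem.Str.isIn (PySem.Str.lower l) (PySem.Str.lower k'))).map
                (fun _ => k'))).contains k))
          = (pvGetDevdepsKeysA j).filter (fun k =>
            !(versions.any (fun l => PySem.Str.isIn (PySem.Str.lower l) (PySem.Str.lower k)))) := by
          apply List.filter_congr
          intro k hk
          rw [contains_normalify _ versions k hk]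
        rw [hA, hkeys, List.filter_map]
        rfl
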